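-- pv_equiv track=rewrite | github.com/a-real-ai/pywinassistant | core/window_elements.py | sort_and_categorize_rects
-- ===== SOURCE A (Python) =====
-- def sort_and_categorize_rects(controls_with_rects, size_category_to_print=None):
--     sorted_by_area = sorted(controls_with_rects, key=lambda x: x[1], reverse=True)
--     categorized = {'Bigger': [], 'Medium': [], 'Small': []}
--
--     for control, area in sorted_by_area:
--         if area >= 1000000:
--             categorized['Bigger'].append(control)
--         elif area >= 100000:
--             categorized['Medium'].append(control)
--         else:
--             categorized['Small'].append(control)
--
--     output = []
--     for category, controls in categorized.items():
--         output.append(f"{category} elements:")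
--         for control in controls[:150]:
--             output.append(f"{control}")
--         output.append("")  # For an empty line between categories
--
--     return "\n".join(output).strip()
-- ===== SOURCE B (Python) =====
-- def sort_and_categorize_rects(controls_with_rects, size_category_to_print=None):
--     big, med, small = [], [], []
--     for control, area in controls_with_rects:
--         if area >= 1000000:
--             big.append((control, area))
--         elif area >= 100000:
--             med.append((control, area))
--         else:
--             small.append((control, area))
--     lines = []
--     for header, bucket in (('Bigger', big), ('Medium', med), ('Small', small)):
--         lines.append(header + " elements:")
--         lines.extend(control for control, _ in sorted(bucket, key=lambda x: x[1], reverse=True)[:150])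
--         lines.append("")
--     return "\n".join(lines).strip()
-- ===== Notes on version B (the rewrite author's own statement) =====
-- stated objective: alternative
-- what changed: B replaces A's single global sort followed by dict-based bucketing with a one-pass three-way partition of the unsorted input followed by three independent local stable sorts, one per size category.
import Mathlib
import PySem

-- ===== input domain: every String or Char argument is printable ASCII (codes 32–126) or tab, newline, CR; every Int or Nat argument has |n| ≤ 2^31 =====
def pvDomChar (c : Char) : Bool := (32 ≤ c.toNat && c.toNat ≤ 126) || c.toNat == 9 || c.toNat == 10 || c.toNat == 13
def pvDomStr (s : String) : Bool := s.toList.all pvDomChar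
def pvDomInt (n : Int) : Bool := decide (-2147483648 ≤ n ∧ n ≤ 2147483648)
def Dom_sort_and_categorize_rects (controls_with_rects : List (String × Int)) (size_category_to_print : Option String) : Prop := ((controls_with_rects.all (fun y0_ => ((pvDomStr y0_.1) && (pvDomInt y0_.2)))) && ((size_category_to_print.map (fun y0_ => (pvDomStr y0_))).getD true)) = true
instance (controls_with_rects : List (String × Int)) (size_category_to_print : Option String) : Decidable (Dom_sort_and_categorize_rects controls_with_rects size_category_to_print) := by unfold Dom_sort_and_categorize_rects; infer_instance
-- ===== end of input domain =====

-- B replaces A's global sort + dict bucketing with a one-pass three-way partition followed by three local stable sorts (objective: alternative decomposition, same cost).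


-- ===== PORT A =====
def sort_and_categorize_rects (controls_with_rects : List (String × Int)) (size_category_to_print : Option String) : String :=
  let sorted_by_area := PySem.List.sorted controls_with_rects (fun x => x.2) true
  let categorized : PySem.Dict String (List String) :=
    sorted_by_area.foldl (fun d x =>
      if x.2 ≥ 1000000 then d.modify "Bigger" [] (· ++ [x.1])
      else if x.2 ≥ 100000 then d.modify "Medium" [] (· ++ [x.1])
      else d.modify "Small" [] (· ++ [x.1]))
      (PySem.Dict.mk [("Bigger", []), ("Medium", []), ("Small", [])])
  let output : List String := categorized.items.foldl (fun out p =>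
      (out ++ [p.1 ++ " elements:"] ++ PySem.List.slice p.2 none (some 150)) ++ [""]) []
  PySem.Str.strip (PySem.Str.join "\n" output)

-- ===== PORT B =====
def sort_and_categorize_rects_alt (controls_with_rects : List (String × Int)) (size_category_to_print : Option String) : String :=
  let buckets := controls_with_rects.foldl
    (fun acc x =>
      if x.2 ≥ 1000000 then (acc.1 ++ [x], acc.2.1, acc.2.2)
      else if x.2 ≥ 100000 then (acc.1, acc.2.1 ++ [x], acc.2.2)
      else (acc.1, acc.2.1, acc.2.2 ++ [x]))
    (([], [], []) : List (String × Int) × List (String × Int) × List (String × Int))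
  let lines : List String :=
    [("Bigger", buckets.1), ("Medium", buckets.2.1), ("Small", buckets.2.2)].foldl
      (fun ls hb =>
        (ls ++ [hb.1 ++ " elements:"]
            ++ ((PySem.List.sorted hb.2 (fun x => x.2) true).take 150).map (·.1)) ++ [""])
      []
  PySem.Str.strip (PySem.Str.join "\n" lines)

-- ===== PRECONDITION & SPEC =====
def Spec_sort_and_categorize_rects (controls_with_rects : List (String × Int)) (size_category_to_print : Option String) (out : String) : Prop := out = sort_and_categorize_rects_alt controls_with_rects size_category_to_print
instance (controls_with_rects : List (String × Int)) (size_category_to_print : Option String) (out : String) : Decidable (Spec_sort_and_categorize_rects controls_with_rects size_category_to_print out) := by unfold Spec_sort_and_categorize_rects; infer_instance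

-- ===== CLAIM (what is proved, stated in full; the proofs are below) =====
def Claim_equal_sort_and_categorize_rects : Prop := ∀ (controls_with_rects : List (String × Int)) (size_category_to_print : Option String), Dom_sort_and_categorize_rects controls_with_rects size_category_to_print → Spec_sort_and_categorize_rects controls_with_rects size_category_to_print (sort_and_categorize_rects controls_with_rects size_category_to_print)

-- ===== LEMMAS AND PROOFS =====

-- bucket predicates (proof-only)
def pvBig (x : String × Int) : Bool := decide (x.2 ≥ 1000000)
def pvMed (x : String × Int) : Bool := !pvBig x && decide (x.2 ≥ 100000)
def pvSml (x : String × Int) : Bool := !pvBig x && !(decide (x.2 ≥ 100000))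

-- descending-by-area order used throughout
def pvGe (a b : String × Int) : Prop := b.2 ≤ a.2
def pvBef (a b : String × Int) : Bool := decide (b.2 < a.2)

theorem pv_insertBy_front (x : String × Int) (ys : List (String × Int))
    (h : ∀ z ∈ ys, z.2 < x.2) : PySem.List.insertBy pvBef x ys = x :: ys := by
  cases ys with
  | nil => simp [PySem.List.insertBy]
  | cons y t =>
    have : pvBef x y = true := by simp [pvBef]; exact h y (by simp)
    simp [PySem.List.insertBy, this]

theorem pv_insertBy_pairwise (x : String × Int) (ys : List (String × Int))
    (h : ys.Pairwise pvGe) : (PySem.List.insertBy pvBef x ys).Pairwise pvGe := by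
  induction ys with
  | nil => simp [PySem.List.insertBy, pvGe]
  | cons y t ih =>
    rcases List.pairwise_cons.mp h with ⟨hy, ht⟩
    by_cases hb : pvBef x y = true
    · have hxy : y.2 < x.2 := by simpa [pvBef] using hb
      simp only [PySem.List.insertBy, hb, if_pos]
      refine List.pairwise_cons.mpr ⟨?_, h⟩
      intro z hz
      rcases List.mem_cons.mp hz with rfl | hz
      · exact le_of_lt hxy
      · exact le_trans (hy z hz) (le_of_lt hxy)
    · have hxy : x.2 ≤ y.2 := by
        simp [pvBef] at hb; exact hb
      simp only [PySem.List.insertBy, hb, if_neg, Bool.false_eq_true, not_false_iff]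
      refine List.pairwise_cons.mpr ⟨?_, ih ht⟩
      intro z hz
      rcases (PySem.List.mem_insertBy pvBef x z t).mp hz with rfl | hz
      · exact hxy
      · exact hy z hz

theorem pv_filter_insertBy (p : String × Int → Bool) (x : String × Int) (ys : List (String × Int))
    (h : ys.Pairwise pvGe) :
    (PySem.List.insertBy pvBef x ys).filter p
      = if p x then PySem.List.insertBy pvBef x (ys.filter p) else ys.filter p := by
  induction ys with
  | nil => cases hpx : p x <;> simp [PySem.List.insertBy, List.filter, hpx]
  | cons y t ih =>
    rcases List.pairwise_cons.mp h with ⟨hy, ht⟩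
    by_cases hb : pvBef x y = true
    · have hxy : y.2 < x.2 := by simpa [pvBef] using hb
      simp only [PySem.List.insertBy, hb, if_pos]
      cases hpx : p x with
      | false => simp [List.filter, hpx]
      | true =>
        cases hpy : p y with
        | true => simp [List.filter, hpx, hpy, PySem.List.insertBy, hb]
        | false =>
          have : PySem.List.insertBy pvBef x (t.filter p) = x :: t.filter p := by
            apply pv_insertBy_front
            intro z hz
            exact lt_of_le_of_lt (hy z (List.mem_of_mem_filter hz)) hxy
          simp [List.filter, hpx, hpy, this]
    · simp only [PySem.List.insertBy, hb, if_neg, Bool.false_eq_true, not_false_iff]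
      cases hpx : p x with
      | false =>
        cases hpy : p y <;> simp [List.filter, hpx, hpy, ih ht]
      | true =>
        cases hpy : p y with
        | true => simp [List.filter, hpx, hpy, ih ht, PySem.List.insertBy, hb]
        | false => simp [List.filter, hpx, hpy, ih ht]

theorem pv_filter_foldl (p : String × Int → Bool) (xs : List (String × Int))
    (acc : List (String × Int)) (h : acc.Pairwise pvGe) :
    (xs.foldl (fun a x => PySem.List.insertBy pvBef x a) acc).filter p
      = (xs.filter p).foldl (fun a x => PySem.List.insertBy pvBef x a) (acc.filter p) := by
  induction xs generalizing acc with
  | nil => simp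
  | cons x t ih =>
    have hins := pv_insertBy_pairwise x acc h
    cases hpx : p x with
    | true =>
      simp only [List.foldl, List.filter, hpx]
      rw [ih _ hins, pv_filter_insertBy p x acc h]
      simp [hpx]
    | false =>
      simp only [List.foldl, List.filter, hpx]
      rw [ih _ hins, pv_filter_insertBy p x acc h]
      simp [hpx]

theorem pv_bef_eq : (fun a b : String × Int => decide ((fun x : String × Int => x.2) b < (fun x : String × Int => x.2) a)) = pvBef := by
  funext a b; rfl

theorem pv_sorted_filter (p : String × Int → Bool) (xs : List (String × Int)) :
    (PySem.List.sorted xs (fun x => x.2) true).filter p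
      = PySem.List.sorted (xs.filter p) (fun x => x.2) true := by
  rw [PySem.List.sorted_rev_eq_foldl_insertBy, PySem.List.sorted_rev_eq_foldl_insertBy]
  rw [pv_bef_eq]
  simpa using pv_filter_foldl p xs [] (by simp)

-- A's dict-building fold, characterised by three filters
theorem pv_dict_fold (l : List (String × Int)) (b0 m0 s0 : List String) :
    (l.foldl (fun d x =>
        if x.2 ≥ 1000000 then d.modify "Bigger" [] (· ++ [x.1])
        else if x.2 ≥ 100000 then d.modify "Medium" [] (· ++ [x.1])
        else d.modify "Small" [] (· ++ [x.1]))
      (PySem.Dict.mk [("Bigger", b0), ("Medium", m0), ("Small", s0)])).items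
    = [("Bigger", b0 ++ (l.filter pvBig).map (·.1)),
       ("Medium", m0 ++ (l.filter pvMed).map (·.1)),
       ("Small", s0 ++ (l.filter pvSml).map (·.1))] := by
  induction l generalizing b0 m0 s0 with
  | nil => simp
  | cons x t ih =>
    rw [List.foldl_cons]
    by_cases h1 : x.2 ≥ 1000000
    · rw [if_pos h1,
        show (PySem.Dict.mk [("Bigger", b0), ("Medium", m0), ("Small", s0)]).modify "Bigger" [] (· ++ [x.1])
          = PySem.Dict.mk [("Bigger", b0 ++ [x.1]), ("Medium", m0), ("Small", s0)] from by
            simp [PySem.Dict.modify, PySem.Dict.insert, PySem.Dict.getD, PySem.Dict.get?, PySem.Dict.contains],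
        ih]
      simp [List.filter, pvBig, pvMed, pvSml, h1]
    · by_cases h2 : x.2 ≥ 100000
      · rw [if_neg h1, if_pos h2,
          show (PySem.Dict.mk [("Bigger", b0), ("Medium", m0), ("Small", s0)]).modify "Medium" [] (· ++ [x.1])
            = PySem.Dict.mk [("Bigger", b0), ("Medium", m0 ++ [x.1]), ("Small", s0)] from by
              simp [PySem.Dict.modify, PySem.Dict.insert, PySem.Dict.getD, PySem.Dict.get?, PySem.Dict.contains],
          ih]
        simp [List.filter, pvBig, pvMed, pvSml, h1, h2]
      · rw [if_neg h1, if_neg h2,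
          show (PySem.Dict.mk [("Bigger", b0), ("Medium", m0), ("Small", s0)]).modify "Small" [] (· ++ [x.1])
            = PySem.Dict.mk [("Bigger", b0), ("Medium", m0), ("Small", s0 ++ [x.1])] from by
              simp [PySem.Dict.modify, PySem.Dict.insert, PySem.Dict.getD, PySem.Dict.get?, PySem.Dict.contains],
          ih]
        simp [List.filter, pvBig, pvMed, pvSml, h1, h2]

-- B's partition fold, characterised by the same three filters
theorem pv_partition_fold (xs : List (String × Int)) (b m s : List (String × Int)) :
    xs.foldl (fun acc x =>
        if x.2 ≥ 1000000 then (acc.1 ++ [x], acc.2.1, acc.2.2)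
        else if x.2 ≥ 100000 then (acc.1, acc.2.1 ++ [x], acc.2.2)
        else (acc.1, acc.2.1, acc.2.2 ++ [x])) (b, m, s)
      = (b ++ xs.filter pvBig, m ++ xs.filter pvMed, s ++ xs.filter pvSml) := by
  induction xs generalizing b m s with
  | nil => simp
  | cons x t ih =>
    by_cases h1 : x.2 ≥ 1000000
    · simp only [List.foldl, h1, if_pos, ih]
      simp [List.filter, pvBig, pvMed, pvSml, h1]
    · by_cases h2 : x.2 ≥ 100000
      · simp only [List.foldl, h1, h2, if_pos, ih]
        simp [List.filter, pvBig, pvMed, pvSml, h1, h2]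
      · simp only [List.foldl, h1, h2, ih]
        simp [List.filter, pvBig, pvMed, pvSml, h1, h2]

-- ===== VERDICT (by name: the statement is the Claim_ definition above) =====
theorem sort_and_categorize_rects_spec : Claim_equal_sort_and_categorize_rects := by
  intro controls size _
  unfold Spec_sort_and_categorize_rects sort_and_categorize_rects sort_and_categorize_rects_alt
  refine congrArg (fun l => PySem.Str.strip (PySem.Str.join "\n" l)) ?_
  rw [pv_dict_fold, pv_partition_fold]
  simp only [List.foldl_cons, List.foldl_nil, List.nil_append]
  rw [PySem.List.slice_to _ (by norm_num), PySem.List.slice_to _ (by norm_num),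
      PySem.List.slice_to _ (by norm_num)]
  rw [← pv_sorted_filter pvBig controls, ← pv_sorted_filter pvMed controls,
      ← pv_sorted_filter pvSml controls]
  simp [List.map_take, List.append_assoc]
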